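-- pv_equiv track=rewrite | github.com/kingddd04/Python_Scripts | Phython Scripts/Python Rehabilitation Homeworks/HW8rec/program01.old.py | swap_multiple_consecutive_tuples
-- ===== SOURCE A (Python) =====
-- def swap_multiple_consecutive_tuples(tuples_list):
--     # Initialize a variable to keep track of the index
--     i = 0
--     # Use a while loop to iterate over the list
--     while i < len(tuples_list) - 2:
--         # Check for two consecutive tuples and a different third tuple
--         if tuples_list[i] == tuples_list[i + 1] and tuples_list[i] != tuples_list[i + 2]:
--             # Swap the second and third tuples
--             tuples_list[i + 1], tuples_list[i + 2] = tuples_list[i + 2], tuples_list[i + 1]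
--             # Move the index to the next tuple after the swapped pair
--             i += 3
--         else:
--             # Move to the next tuple if no swap is needed
--             i += 1
--
--     return tuples_list
-- ===== SOURCE B (Python) =====
-- def swap_multiple_consecutive_tuples(tuples_list):
--     # One forward pass with a sliding 3-element buffer; mutates tuples_list like A and returns it.
--     res = []
--     buf = []
--     for x in tuples_list:
--         buf.append(x)
--         if len(buf) == 3:
--             a, b, c = buf
--             if a == b and a != c:
--                 res.extend((a, c, b))
--                 buf = []
--             else:
--                 res.append(a)
--                 buf = [b, c]
--     res.extend(buf)
--     tuples_list[:] = res
--     return tuples_list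
-- ===== Notes on version B (the rewrite author's own statement) =====
-- stated objective: alternative
-- what changed: replaces A's index-based in-place swapping with variable stride (1 or 3) by a single forward pass over the elements maintaining a sliding 3-element buffer and building a new list, then writing it back
import Mathlib
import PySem

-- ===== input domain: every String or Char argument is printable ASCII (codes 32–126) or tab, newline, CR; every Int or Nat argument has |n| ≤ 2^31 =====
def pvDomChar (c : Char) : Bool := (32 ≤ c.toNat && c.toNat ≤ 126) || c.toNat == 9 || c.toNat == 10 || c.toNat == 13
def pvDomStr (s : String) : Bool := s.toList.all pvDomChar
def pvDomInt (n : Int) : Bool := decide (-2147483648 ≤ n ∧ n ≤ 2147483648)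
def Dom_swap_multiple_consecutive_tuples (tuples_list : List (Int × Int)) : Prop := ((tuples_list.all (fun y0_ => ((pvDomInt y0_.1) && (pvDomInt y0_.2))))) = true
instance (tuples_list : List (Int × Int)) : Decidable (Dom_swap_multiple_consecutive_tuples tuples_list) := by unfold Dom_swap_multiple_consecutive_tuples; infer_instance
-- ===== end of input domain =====

-- B replaces A's index-based in-place swapping (variable stride 1/3) by a single forward pass with a
-- sliding 3-element buffer that builds a new list (objective: alternative decomposition, same O(n) cost).
-- A mutates its argument in place; the Python B performs the same mutation (tuples_list[:] = res); the
-- equivalence proved here is about the return value.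

-- ===== PORT A =====
-- the while loop of A: state is the list and the index i
def swapLoopA (l : List (Int × Int)) (i : Nat) : List (Int × Int) :=
  if h : i + 2 < l.length then
    if l.getD i (0, 0) = l.getD (i + 1) (0, 0) ∧ l.getD i (0, 0) ≠ l.getD (i + 2) (0, 0) then
      swapLoopA ((l.set (i + 1) (l.getD (i + 2) (0, 0))).set (i + 2) (l.getD (i + 1) (0, 0))) (i + 3)
    else
      swapLoopA l (i + 1)
  else l
termination_by l.length - i
decreasing_by
  · simp only [List.length_set]; omega
  · omega

def swap_multiple_consecutive_tuples (tuples_list : List (Int × Int)) : List (Int × Int) :=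
  swapLoopA tuples_list 0

-- ===== PORT B =====
-- one step of B's for loop: state is (res, buf)
def stepB (s : List (Int × Int) × List (Int × Int)) (x : Int × Int) : List (Int × Int) × List (Int × Int) :=
  let buf := s.2 ++ [x]
  match buf with
  | [a, b, c] => if a = b ∧ a ≠ c then (s.1 ++ [a, c, b], []) else (s.1 ++ [a], [b, c])
  | _ => (s.1, buf)

def swap_multiple_consecutive_tuples_alt (tuples_list : List (Int × Int)) : List (Int × Int) :=
  let s := tuples_list.foldl stepB ([], [])
  s.1 ++ s.2

-- ===== PRECONDITION & SPEC =====
def Spec_swap_multiple_consecutive_tuples (tuples_list : List (Int × Int)) (out : List (Int × Int)) : Prop := out = swap_multiple_consecutive_tuples_alt tuples_list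
instance (tuples_list : List (Int × Int)) (out : List (Int × Int)) : Decidable (Spec_swap_multiple_consecutive_tuples tuples_list out) := by unfold Spec_swap_multiple_consecutive_tuples; infer_instance

-- ===== CLAIM (what is proved, stated in full; the proofs are below) =====
def Claim_equal_swap_multiple_consecutive_tuples : Prop := ∀ (tuples_list : List (Int × Int)), Dom_swap_multiple_consecutive_tuples tuples_list → Spec_swap_multiple_consecutive_tuples tuples_list (swap_multiple_consecutive_tuples tuples_list)

-- ===== LEMMAS AND PROOFS =====

-- reference recursion: both ports are proved equal to this structural description
def swapRec : List (Int × Int) → List (Int × Int)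
  | a :: b :: c :: rest =>
      if a = b ∧ a ≠ c then a :: c :: b :: swapRec rest
      else a :: swapRec (b :: c :: rest)
  | xs => xs

lemma swapRec_cons3 (a b c : Int × Int) (rest : List (Int × Int)) :
    swapRec (a :: b :: c :: rest) =
      if a = b ∧ a ≠ c then a :: c :: b :: swapRec rest else a :: swapRec (b :: c :: rest) := rfl

lemma getD_append_len {α : Type} [Inhabited α] (pre xs : List α) (k : Nat) (d : α) :
    (pre ++ xs).getD (pre.length + k) d = xs.getD k d := by
  simp [List.getD, List.getElem?_append_right]

lemma set_append_len {α : Type} (pre xs : List α) (k : Nat) (v : α) :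
    (pre ++ xs).set (pre.length + k) v = pre ++ xs.set k v := by
  induction pre with
  | nil => simp
  | cons h t ih => simp [Nat.succ_add, ih]

lemma swapLoopA_eq (xs : List (Int × Int)) : ∀ pre : List (Int × Int),
    swapLoopA (pre ++ xs) pre.length = pre ++ swapRec xs := by
  induction xs using swapRec.induct with
  | case1 a b c rest hcond ih =>
      intro pre
      rw [swapLoopA]
      have hlen : pre.length + 2 < (pre ++ (a :: b :: c :: rest)).length := by
        simp
      rw [dif_pos hlen]
      have g0 : (pre ++ (a :: b :: c :: rest)).getD (pre.length) (0,0) = a := by simp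
      have g1 : (pre ++ (a :: b :: c :: rest)).getD (pre.length + 1) (0,0) = b :=
        getD_append_len pre (a :: b :: c :: rest) 1 (0,0)
      have g2 : (pre ++ (a :: b :: c :: rest)).getD (pre.length + 2) (0,0) = c :=
        getD_append_len pre (a :: b :: c :: rest) 2 (0,0)
      rw [g0, g1, g2, if_pos hcond]
      have hset : ((pre ++ (a :: b :: c :: rest)).set (pre.length + 1) c).set (pre.length + 2) b
          = (pre ++ [a, c, b]) ++ rest := by
        rw [set_append_len, set_append_len]
        simp [List.set]
      rw [hset]
      have hl : pre.length + 3 = (pre ++ [a, c, b]).length := by simp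
      rw [hl, ih, swapRec_cons3, if_pos hcond]
      simp
  | case2 a b c rest hcond ih =>
      intro pre
      rw [swapLoopA]
      have hlen : pre.length + 2 < (pre ++ (a :: b :: c :: rest)).length := by
        simp
      rw [dif_pos hlen]
      have g0 : (pre ++ (a :: b :: c :: rest)).getD (pre.length) (0,0) = a := by simp
      have g1 : (pre ++ (a :: b :: c :: rest)).getD (pre.length + 1) (0,0) = b :=
        getD_append_len pre (a :: b :: c :: rest) 1 (0,0)
      have g2 : (pre ++ (a :: b :: c :: rest)).getD (pre.length + 2) (0,0) = c :=
        getD_append_len pre (a :: b :: c :: rest) 2 (0,0)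
      rw [g0, g1, g2, if_neg hcond]
      have hl : pre.length + 1 = (pre ++ [a]).length := by simp
      have : pre ++ (a :: b :: c :: rest) = (pre ++ [a]) ++ (b :: c :: rest) := by simp
      rw [this, hl, ih, swapRec_cons3, if_neg hcond]
      simp
  | case3 xs hshort =>
      intro pre
      rw [swapLoopA]
      have hlen : ¬ pre.length + 2 < (pre ++ xs).length := by
        rcases xs with _ | ⟨a, _ | ⟨b, _ | ⟨c, rest⟩⟩⟩
        · simp
        · simp
        · simp
        · exact absurd rfl (hshort a b c rest)
      rw [dif_neg hlen]
      have : swapRec xs = xs := by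
        rcases xs with _ | ⟨a, _ | ⟨b, _ | ⟨c, rest⟩⟩⟩
        · rfl
        · rfl
        · rfl
        · exact absurd rfl (hshort a b c rest)
      rw [this]

lemma foldl_stepB_eq (xs : List (Int × Int)) : ∀ (res : List (Int × Int)) (buf : List (Int × Int)),
    buf.length ≤ 2 →
    (let s := xs.foldl stepB (res, buf); s.1 ++ s.2) = res ++ swapRec (buf ++ xs) := by
  induction xs with
  | nil =>
      intro res buf hb
      rcases buf with _ | ⟨a, _ | ⟨b, _ | ⟨c, t⟩⟩⟩ <;> simp_all [swapRec]
  | cons x xs ih =>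
      intro res buf hb
      rcases buf with _ | ⟨a, _ | ⟨b, _ | ⟨c, t⟩⟩⟩
      · simpa [List.foldl, stepB] using ih res [x] (by simp)
      · simpa [List.foldl, stepB] using ih res [a, x] (by simp)
      · simp only [List.foldl, stepB, List.cons_append, List.nil_append]
        by_cases hc : a = b ∧ a ≠ x
        · rw [if_pos hc]
          have := ih (res ++ [a, x, b]) [] (by simp)
          simp only [List.nil_append] at this
          rw [this, swapRec_cons3, if_pos hc]
          simp
        · rw [if_neg hc]
          have := ih (res ++ [a]) [b, x] (by simp)
          rw [this, swapRec_cons3, if_neg hc]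
          simp
      · simp at hb

-- ===== VERDICT (by name: the statement is the Claim_ definition above) =====
theorem swap_multiple_consecutive_tuples_spec : Claim_equal_swap_multiple_consecutive_tuples := by
  intro l _
  show swap_multiple_consecutive_tuples l = swap_multiple_consecutive_tuples_alt l
  have hA : swap_multiple_consecutive_tuples l = swapRec l := by
    have := swapLoopA_eq l []
    simpa [swap_multiple_consecutive_tuples] using this
  have hB : swap_multiple_consecutive_tuples_alt l = swapRec l := by
    have := foldl_stepB_eq l [] [] (by simp)
    simpa [swap_multiple_consecutive_tuples_alt] using this
  rw [hA, hB]
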